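-- pv_equiv track=rewrite | github.com/JacobAraujo/Parser-Descendente-Recursivo | parser-descendente-recursivo.py | moreThanOneIdType
-- ===== SOURCE A (Python) =====
-- def parserId(tokens):
--     if tokens:
--         return tokens[0].isidentifier()
--     return False
--
-- def parserType(tokens):
--     return tokens[0].upper() in ['INTEGER', 'VARCHAR', 'BOOLEAN', 'FLOAT', 'DATE', 'TIME', 'DATETIME', 'TEXT', 'CHAR', 'BINARY', 'DOUBLE', 'NUMERIC', 'DECIMAL', 'BIT']
--
-- def moreThanOneIdType(tokens):
--     if tokens[0] == ',':
--         tokens.pop(0)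
--         if parserId(tokens):
--             tokens.pop(0)
--             if parserType(tokens):
--                 tokens.pop(0)
--                 tokens = moreThanOneIdType(tokens)
--     return tokens
-- ===== SOURCE B (Python) =====
-- def parserId(tokens):
--     if tokens:
--         return tokens[0].isidentifier()
--     return False
--
-- def parserType(tokens):
--     return tokens[0].upper() in ['INTEGER', 'VARCHAR', 'BOOLEAN', 'FLOAT', 'DATE', 'TIME', 'DATETIME', 'TEXT', 'CHAR', 'BINARY', 'DOUBLE', 'NUMERIC', 'DECIMAL', 'BIT']
--
-- def moreThanOneIdType(tokens):
--     # iterative loop instead of A's recursion; same in-place pops, same list object returned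
--     while tokens[0] == ',':
--         tokens.pop(0)
--         if not parserId(tokens):
--             break
--         tokens.pop(0)
--         if not parserType(tokens):
--             break
--         tokens.pop(0)
--     return tokens
-- ===== Notes on version B (the rewrite author's own statement) =====
-- stated objective: simpler
-- what changed: Replaces A's self-recursion (with rebinding of the returned list) by a plain iterative while-loop with breaks over the same mutable token list.
import Mathlib
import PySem

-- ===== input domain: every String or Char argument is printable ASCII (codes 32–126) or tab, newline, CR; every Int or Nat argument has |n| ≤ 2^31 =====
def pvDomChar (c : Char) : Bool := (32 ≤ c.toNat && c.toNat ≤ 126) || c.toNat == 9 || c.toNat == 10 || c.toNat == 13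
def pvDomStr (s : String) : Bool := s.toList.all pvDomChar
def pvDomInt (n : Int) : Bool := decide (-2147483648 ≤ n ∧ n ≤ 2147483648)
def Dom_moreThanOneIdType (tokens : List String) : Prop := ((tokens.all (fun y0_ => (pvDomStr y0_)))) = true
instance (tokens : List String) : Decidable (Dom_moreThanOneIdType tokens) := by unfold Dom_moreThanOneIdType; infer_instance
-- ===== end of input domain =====

-- B replaces A's self-recursion by an iterative while-loop with breaks (objective: simpler);
-- both mutate the list in place in Python and return that same list — the theorem is about the returned value.

-- ===== PORT A =====
-- s.isidentifier(), ported by hand: exact on the ASCII domain ([A-Za-z_][A-Za-z0-9_]*, nonempty)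
def pyIsIdentifier (s : String) : Bool :=
  match s.toList with
  | [] => false
  | c :: cs =>
    (PySem.Chars.isalpha c || c == '_') && cs.all (fun d => PySem.Chars.isalnum d || d == '_')

def parserId (tokens : List String) : Bool :=
  match tokens with
  | [] => false
  | t :: _ => pyIsIdentifier t

def pyTypeNames : List String :=
  ["INTEGER", "VARCHAR", "BOOLEAN", "FLOAT", "DATE", "TIME", "DATETIME", "TEXT",
   "CHAR", "BINARY", "DOUBLE", "NUMERIC", "DECIMAL", "BIT"]

-- parserType raises IndexError on []; the port returns false there (such inputs are outside Pre_)
def parserType (tokens : List String) : Bool :=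
  match tokens with
  | [] => false
  | t :: _ => pyTypeNames.contains (PySem.Str.upper t)

def moreThanOneIdType (tokens : List String) : List String :=
  match tokens with
  | [] => []                                -- tokens[0]: IndexError in Python; outside Pre_
  | t :: rest =>
    if t = "," then
      if parserId rest then
        match rest with
        | [] => []                          -- unreachable: parserId [] = false
        | _ :: rest2 =>
          if parserType rest2 then
            match rest2 with
            | [] => []                      -- unreachable: parserType [] = false
            | _ :: rest3 => moreThanOneIdType rest3
          else rest2
      else rest
    else t :: rest

-- ===== PORT B =====
def parserIdB (tokens : List String) : Bool :=
  match tokens with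
  | [] => false
  | t :: _ => pyIsIdentifier t

def parserTypeB (tokens : List String) : Bool :=
  match tokens with
  | [] => false                             -- IndexError in Python; outside Pre_
  | t :: _ => pyTypeNames.contains (PySem.Str.upper t)

-- the while-loop of Source B: loop-head test, three pops, two breaks
def moreThanOneIdType_alt (tokens : List String) : List String :=
  match tokens with
  | [] => []                                -- `while tokens[0]`: IndexError in Python; outside Pre_
  | t :: rest =>
    if !(t = ",") then t :: rest            -- loop condition false: fall out, return tokens
    else
      let tokens := rest                    -- tokens.pop(0)
      if !parserIdB tokens then tokens      -- break
      else
        let tokens := tokens.tail           -- tokens.pop(0)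
        if !parserTypeB tokens then tokens  -- break
        else moreThanOneIdType_alt tokens.tail  -- tokens.pop(0); back to loop head
  termination_by tokens.length
  decreasing_by
    all_goals
      show (rest.tail).tail.length < (t :: rest).length
      have h1 : rest.tail.length = rest.length - 1 := List.length_tail
      have h2 : rest.tail.tail.length = rest.tail.length - 1 := List.length_tail
      simp only [List.length_cons]
      omega

-- ===== PRECONDITION & SPEC =====
-- Pre_ excludes exactly the inputs on which A raises IndexError: the list is empty, or after some
-- leading complete (',', identifier, type) triples it ends right after a ',' and an identifier
-- (parserType reads past the end) or ends exactly at a triple boundary (the next tokens[0] read).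
def preCheck : List String → Bool
  | [] => false
  | t :: rest =>
    if t = "," then
      match rest with
      | [] => true
      | i :: rest2 =>
        if pyIsIdentifier i then
          match rest2 with
          | [] => false
          | ty :: rest3 =>
            if pyTypeNames.contains (PySem.Str.upper ty) then
              (match rest3 with
                | [] => false
                | _ => preCheck rest3)
            else true
        else true
    else true

def Pre_moreThanOneIdType (tokens : List String) : Prop := preCheck tokens = true

instance (tokens : List String) : Decidable (Pre_moreThanOneIdType tokens) := by
  unfold Pre_moreThanOneIdType; infer_instance

def pvWitness_moreThanOneIdType : List String := [",", "x", "date", "rest"]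

def Spec_moreThanOneIdType (tokens : List String) (out : List String) : Prop := out = moreThanOneIdType_alt tokens
instance (tokens : List String) (out : List String) : Decidable (Spec_moreThanOneIdType tokens out) := by unfold Spec_moreThanOneIdType; infer_instance

-- ===== CLAIM (what is proved, stated in full; the proofs are below) =====
def Claim_equal_moreThanOneIdType : Prop := ∀ (tokens : List String), Dom_moreThanOneIdType tokens → Pre_moreThanOneIdType tokens → Spec_moreThanOneIdType tokens (moreThanOneIdType tokens)

-- ===== LEMMAS AND PROOFS =====

theorem idB_eq_id : ∀ l, parserIdB l = parserId l := fun l => by cases l <;> rfl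

theorem tyB_eq_ty : ∀ l, parserTypeB l = parserType l := fun l => by cases l <;> rfl

theorem ports_agree : ∀ (tokens : List String), moreThanOneIdType tokens = moreThanOneIdType_alt tokens := by
  intro tokens
  induction tokens using moreThanOneIdType.induct with
  | case1 => simp [moreThanOneIdType.eq_def, moreThanOneIdType_alt]
  | case2 h => simp [parserId] at h
  | case3 t h => simp [parserType] at h
  | case4 t t1 tail hty hid ih =>
      rw [moreThanOneIdType.eq_def]
      simp [moreThanOneIdType_alt, idB_eq_id, tyB_eq_ty, hid, hty, ih]
  | case5 t tail hty hid =>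
      simp [moreThanOneIdType.eq_def, moreThanOneIdType_alt, idB_eq_id, tyB_eq_ty, hid, hty]
  | case6 tail hid =>
      simp [moreThanOneIdType.eq_def, moreThanOneIdType_alt, idB_eq_id, hid]
  | case7 t tail ht =>
      simp [moreThanOneIdType.eq_def, moreThanOneIdType_alt, ht]

-- ===== VERDICT (by name: the statement is the Claim_ definition above) =====
theorem moreThanOneIdType_spec : Claim_equal_moreThanOneIdType := by
  intro tokens _ _
  exact ports_agree tokens
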